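-- pv_equiv track=rewrite | github.com/wang2000star/Yux_Project | StreamCipher/BGV-Symmetric/Symmetric/optimze.py | find_max_submatrix
-- ===== SOURCE A (Python) =====
-- import itertools
--
-- def find_max_submatrix(Index, N):
--     max_index_len = 0
--     max_combinations = []
--
--     for rows in itertools.combinations(range(len(Index)), N):
--         intersection = set(Index[rows[0]])
--         for row in rows[1:]:
--             intersection &= set(Index[row])
--         index_len = (len(intersection) - 1) * (N - 1)
--         if index_len > max_index_len:
--             max_index_len = index_len
--             max_combinations = [rows]
--         elif index_len == max_index_len:
--             max_combinations.append(rows)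
--
--     return max_index_len, max_combinations
-- ===== SOURCE B (Python) =====
-- def find_max_submatrix(Index, N):
--     # DFS over index combinations carrying the running partial intersection;
--     # row sets are precomputed once; branches too short to complete are pruned.
--     sets = [set(row) for row in Index]
--     n = len(Index)
--
--     def dfs(pos, need, inter, chosen, state):
--         if need == 0:
--             best, combos = state
--             score = (len(inter) - 1) * (N - 1)
--             if score > best:
--                 return (score, [chosen])
--             if score == best:
--                 return (best, combos + [chosen])
--             return state
--         for i in range(pos, n - need + 1):
--             state = dfs(i + 1, need - 1,
--                         sets[i] if inter is None else inter & sets[i],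
--                         chosen + (i,), state)
--         return state
--
--     return dfs(0, N, None, (), (0, []))
-- ===== Notes on version B (the rewrite author's own statement) =====
-- stated objective: alternative
-- what changed: B precomputes each row's set once and runs a pruned DFS over index combinations carrying the running partial intersection, instead of A's materializing every combination and re-building and re-intersecting all N row sets from scratch for each.
import Mathlib
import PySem

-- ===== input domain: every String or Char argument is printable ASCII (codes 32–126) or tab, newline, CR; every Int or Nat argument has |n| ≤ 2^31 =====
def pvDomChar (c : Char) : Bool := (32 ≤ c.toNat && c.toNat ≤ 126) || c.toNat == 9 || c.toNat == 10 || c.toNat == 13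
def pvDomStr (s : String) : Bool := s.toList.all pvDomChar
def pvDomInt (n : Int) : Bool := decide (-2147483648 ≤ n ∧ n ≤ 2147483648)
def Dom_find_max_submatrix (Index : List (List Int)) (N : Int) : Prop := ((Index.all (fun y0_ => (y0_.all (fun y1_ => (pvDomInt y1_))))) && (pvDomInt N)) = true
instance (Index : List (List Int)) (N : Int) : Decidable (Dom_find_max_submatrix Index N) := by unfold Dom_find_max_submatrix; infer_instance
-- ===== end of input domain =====

-- B replaces A's per-combination set building and full re-intersection by a pruned DFS over
-- index combinations that carries the running partial intersection, with row sets built once.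

-- ===== PORT A =====
-- itertools.combinations of a list, in itertools' lexicographic order
def pvCombs {α : Type} : Nat → List α → List (List α)
  | 0, _ => [[]]
  | _+1, [] => []
  | k+1, x :: xs => (pvCombs k xs).map (fun c => x :: c) ++ pvCombs (k+1) xs

def find_max_submatrix (Index : List (List Int)) (N : Int) : Int × List (List Int) :=
  (pvCombs N.toNat (List.range Index.length)).foldl
    (fun st rows =>
      match rows with
      | [] => st  -- rows[0] would raise IndexError (only reached for N = 0, outside Pre_)
      | r0 :: rest =>
        -- Index[row] is always in range (row ∈ range(len(Index))), so the .getD [] is never taken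
        let intersection := rest.foldl
          (fun acc r => PySem.Set.inter acc (PySem.Set.ofList ((PySem.List.pyGet? Index ((r : Nat) : Int)).getD [])))
          (PySem.Set.ofList ((PySem.List.pyGet? Index ((r0 : Nat) : Int)).getD []))
        let indexLen : Int := (PySem.Set.len intersection - 1) * (N - 1)
        if st.1 < indexLen then (indexLen, [rows.map (fun r => ((r : Nat) : Int))])
        else if indexLen = st.1 then (st.1, st.2 ++ [rows.map (fun r => ((r : Nat) : Int))])
        else st)
    (0, [])

-- ===== PORT B =====
-- dfs(pos, need, inter, chosen, state): 'for i in range(pos, n - need + 1)' becomes a foldl over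
-- that range; the recursion is on `need`. sets[i] is always in range there, so .getD [] is never taken.
def pvDfs (N : Int) (sets : List (PySem.Set Int)) (n : Nat) :
    Nat → Nat → Option (PySem.Set Int) → List Int → Int × List (List Int) → Int × List (List Int)
  | 0, _pos, inter, chosen, state =>
    match inter with
    | none => state  -- len(None) would raise TypeError (only reached for N = 0, outside Pre_)
    | some t =>
      let score : Int := (PySem.Set.len t - 1) * (N - 1)
      if state.1 < score then (score, [chosen])
      else if score = state.1 then (state.1, state.2 ++ [chosen])
      else state
  | need+1, pos, inter, chosen, state =>
    -- Python's upper bound n - (need+1) + 1 = n - need (empty ranges agree with Nat clamping)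
    (List.range' pos ((n - need) - pos) 1).foldl
      (fun st i =>
        pvDfs N sets n need (i+1)
          (some (match inter with
                 | none => (PySem.List.pyGet? sets ((i : Nat) : Int)).getD []
                 | some t => PySem.Set.inter t ((PySem.List.pyGet? sets ((i : Nat) : Int)).getD [])))
          (chosen ++ [((i : Nat) : Int)]) st)
      state

-- N.toNat: exact for N ≥ 0; for N < 0 Python B recurses forever (RecursionError, outside Pre_)
def find_max_submatrix_alt (Index : List (List Int)) (N : Int) : Int × List (List Int) :=
  pvDfs N (Index.map PySem.Set.ofList) Index.length N.toNat 0 none [] (0, [])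

-- ===== PRECONDITION & SPEC =====
-- Pre_ excludes N ≤ 0, where Python A raises (ValueError from combinations for N < 0,
-- IndexError from rows[0] for N = 0).
def Pre_find_max_submatrix (Index : List (List Int)) (N : Int) : Prop := 1 ≤ N
instance (Index : List (List Int)) (N : Int) : Decidable (Pre_find_max_submatrix Index N) := by unfold Pre_find_max_submatrix; infer_instance

def pvWitness_find_max_submatrix : List (List Int) × Int := ([[0, 1], [1, 2]], 2)

def Spec_find_max_submatrix (Index : List (List Int)) (N : Int) (out : Int × List (List Int)) : Prop := out = find_max_submatrix_alt Index N
instance (Index : List (List Int)) (N : Int) (out : Int × List (List Int)) : Decidable (Spec_find_max_submatrix Index N out) := by unfold Spec_find_max_submatrix; infer_instance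

-- ===== CLAIM (what is proved, stated in full; the proofs are below) =====
def Claim_equal_find_max_submatrix : Prop := ∀ (Index : List (List Int)) (N : Int), Dom_find_max_submatrix Index N → Pre_find_max_submatrix Index N → Spec_find_max_submatrix Index N (find_max_submatrix Index N)

-- ===== LEMMAS AND PROOFS =====

-- the max-tracking update both programs perform per combination
def pvUpd (N : Int) (st : Int × List (List Int)) (t : PySem.Set Int) (rows : List Int) : Int × List (List Int) :=
  let score : Int := (PySem.Set.len t - 1) * (N - 1)
  if st.1 < score then (score, [rows])
  else if score = st.1 then (st.1, st.2 ++ [rows])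
  else st

theorem pvCombs_eq_nil_of_short {α : Type} (l : List α) (k : Nat) (h : l.length < k) :
    pvCombs k l = [] := by
  induction l generalizing k with
  | nil => cases k with
    | zero => omega
    | succ k => rfl
  | cons x xs ih =>
    cases k with
    | zero => omega
    | succ k =>
      simp only [List.length_cons] at h
      simp [pvCombs, ih k (by omega), ih (k+1) (by omega)]

-- B's lookup agrees with A's lookup followed by set(·)
theorem pvLookup_eq (Index : List (List Int)) (i : Nat) :
    (PySem.List.pyGet? (Index.map PySem.Set.ofList) ((i : Nat) : Int)).getD []
      = PySem.Set.ofList ((PySem.List.pyGet? Index ((i : Nat) : Int)).getD []) := by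
  simp only [PySem.List.pyGet?_natCast, List.getElem?_map]
  cases Index[i]? <;> rfl

-- the DFS with a running intersection folds the update over exactly the combinations of
-- the remaining index range, each scored by the fully folded intersection
theorem pvDfs_some (N : Int) (Index : List (List Int)) (need : Nat) :
    ∀ (s pos : Nat), Index.length - pos ≤ s →
    ∀ (t : PySem.Set Int) (chosen : List Int) (st : Int × List (List Int)),
    pvDfs N (Index.map PySem.Set.ofList) Index.length need pos (some t) chosen st
      = (pvCombs need (List.range' pos (Index.length - pos) 1)).foldl
          (fun st c =>
            pvUpd N st
              (c.foldl (fun a r => PySem.Set.inter a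
                (PySem.Set.ofList ((PySem.List.pyGet? Index ((r : Nat) : Int)).getD []))) t)
              (chosen ++ c.map (fun r => ((r : Nat) : Int)))) st := by
  induction need with
  | zero =>
    intro s pos _ t chosen st
    simp [pvDfs, pvCombs, pvUpd]
    rfl
  | succ need ih =>
    intro s
    induction s with
    | zero =>
      intro pos hpos t chosen st
      have h0 : Index.length - pos = 0 := by omega
      have h1 : Index.length - need - pos = 0 := by omega
      rw [pvDfs, h0, h1]
      simp [pvCombs]
    | succ s ihs =>
      intro pos hpos t chosen st
      by_cases hlt : pos < Index.length - need
      · -- the loop runs at least once: peel index `pos` off both sides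
        have hr1 : Index.length - need - pos = (Index.length - need - (pos+1)) + 1 := by omega
        have hr2 : Index.length - pos = (Index.length - (pos+1)) + 1 := by omega
        rw [pvDfs, hr1, hr2, List.range'_succ, List.range'_succ]
        simp only [List.foldl_cons, pvCombs, List.foldl_append, List.foldl_map]
        have hstep := ih s (pos+1) (by omega)
          (PySem.Set.inter t ((PySem.List.pyGet? (Index.map PySem.Set.ofList) ((pos : Nat) : Int)).getD []))
          (chosen ++ [((pos : Nat) : Int)]) st
        rw [hstep]
        have houter : ∀ st', pvDfs N (Index.map PySem.Set.ofList) Index.length (need+1) (pos+1)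
            (some t) chosen st'
            = (pvCombs (need+1) (List.range' (pos+1) (Index.length - (pos+1)) 1)).foldl
                (fun st c =>
                  pvUpd N st
                    (c.foldl (fun a r => PySem.Set.inter a
                      (PySem.Set.ofList ((PySem.List.pyGet? Index ((r : Nat) : Int)).getD []))) t)
                    (chosen ++ c.map (fun r => ((r : Nat) : Int)))) st' := by
          intro st'
          exact ihs (pos+1) (by omega) t chosen st'
        rw [← houter]
        rw [pvDfs]
        have hr1' : Index.length - need - (pos+1) + 1 - 1 = Index.length - need - (pos+1) := by omega
        congr 1
        rw [pvLookup_eq]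
        apply PySem.List.foldl_congr_mem
        intro acc c _
        simp [pvUpd]
      · -- the loop is empty and no combination of length need+1 fits in the remaining range
        have h1 : Index.length - need - pos = 0 := by omega
        rw [pvDfs, h1]
        have hshort : (List.range' pos (Index.length - pos) 1).length < need + 1 := by
          simp [List.length_range']; omega
        rw [pvCombs_eq_nil_of_short _ _ hshort]
        simp

-- unrolling the first level: `inter` is still None there
theorem pvDfs_none (N : Int) (Index : List (List Int)) (k : Nat) :
    ∀ (s pos : Nat), Index.length - pos ≤ s →
    ∀ (chosen : List Int) (st : Int × List (List Int)),
    pvDfs N (Index.map PySem.Set.ofList) Index.length (k+1) pos none chosen st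
      = (pvCombs (k+1) (List.range' pos (Index.length - pos) 1)).foldl
          (fun st c =>
            match c with
            | [] => st
            | r0 :: rest =>
              pvUpd N st
                (rest.foldl (fun a r => PySem.Set.inter a
                    (PySem.Set.ofList ((PySem.List.pyGet? Index ((r : Nat) : Int)).getD [])))
                  (PySem.Set.ofList ((PySem.List.pyGet? Index ((r0 : Nat) : Int)).getD [])))
                (chosen ++ c.map (fun r => ((r : Nat) : Int)))) st := by
  intro s
  induction s with
  | zero =>
    intro pos hpos chosen st
    have h0 : Index.length - pos = 0 := by omega
    have h1 : Index.length - k - pos = 0 := by omega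
    rw [pvDfs, h0, h1]
    simp [pvCombs]
  | succ s ihs =>
    intro pos hpos chosen st
    by_cases hlt : pos < Index.length - k
    · have hr1 : Index.length - k - pos = (Index.length - k - (pos+1)) + 1 := by omega
      have hr2 : Index.length - pos = (Index.length - (pos+1)) + 1 := by omega
      rw [pvDfs, hr1, hr2, List.range'_succ, List.range'_succ]
      simp only [List.foldl_cons, pvCombs, List.foldl_append, List.foldl_map]
      rw [pvDfs_some N Index k (Index.length - (pos+1)) (pos+1) (by omega)]
      rw [← ihs (pos+1) (by omega) chosen]
      rw [pvDfs]
      congr 1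
      apply PySem.List.foldl_congr_mem
      intro acc c _
      rw [pvLookup_eq]
      simp [pvUpd]
    · have h1 : Index.length - k - pos = 0 := by omega
      rw [pvDfs, h1]
      have hshort : (List.range' pos (Index.length - pos) 1).length < k + 1 := by
        simp [List.length_range']; omega
      rw [pvCombs_eq_nil_of_short _ _ hshort]
      simp

-- ===== VERDICT (by name: the statement is the Claim_ definition above) =====
theorem find_max_submatrix_spec : Claim_equal_find_max_submatrix := by
  intro Index N _ hPre
  unfold Spec_find_max_submatrix
  obtain ⟨k, rfl⟩ : ∃ k : Nat, N = (k : Int) + 1 :=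
    ⟨(N - 1).toNat, by unfold Pre_find_max_submatrix at hPre; omega⟩
  unfold find_max_submatrix find_max_submatrix_alt
  have hN : ((k : Int) + 1).toNat = k + 1 := by omega
  rw [hN, pvDfs_none ((k : Int) + 1) Index k Index.length 0 (by omega)]
  have hr : List.range' 0 (Index.length - 0) 1 = List.range Index.length := by
    simp [List.range_eq_range']
  rw [hr]
  apply PySem.List.foldl_congr_mem
  intro acc c _
  cases c with
  | nil => rfl
  | cons r0 rest => simp [pvUpd]
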